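-- pv_equiv track=rewrite | github.com/ntt261298/tutoring-api | main/libs/dict.py | merge_dict_recursively
-- ===== SOURCE A (Python) =====
-- from copy import deepcopy
--
-- def merge_dict_recursively(a, b):
--     """recursively merges dict's. not just simple a['key'] = b['key'], if
--     both a and b have a key who's value is a dict then merge_dict_recursively
--     is called on both values and the result stored in the returned
--     dictionary."""
--     if not isinstance(b, dict):
--         return b
--     result = deepcopy(a)
--     for k, v in b.items():
--         if k in result and isinstance(result[k], dict):
--             result[k] = merge_dict_recursively(result[k], v)
--         else:
--             result[k] = deepcopy(v)
--     return result
-- ===== SOURCE B (Python) =====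
-- from copy import deepcopy
--
-- def merge_dict_recursively(a, b):
--     """Build the merge as a fresh dict: one pass over a picks, per key, a's
--     value, b's value, or a recursive merge; a second pass appends b-only keys."""
--     if not isinstance(b, dict):
--         return b
--     merged = {}
--     for k, v in a.items():
--         if k not in b:
--             merged[k] = deepcopy(v)
--         elif isinstance(v, dict):
--             merged[k] = merge_dict_recursively(v, b[k])
--         else:
--             merged[k] = deepcopy(b[k])
--     for k, v in b.items():
--         if k not in a:
--             merged[k] = deepcopy(v)
--     return merged
-- ===== Notes on version B (the rewrite author's own statement) =====
-- stated objective: alternative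
-- what changed: B builds the merge as a fresh dict by a key-partitioned pass over a (choosing a's value, b's value, or a recursive merge per key) followed by appending b-only keys, instead of A's deepcopy of a updated in place by a single loop over b.
import Mathlib
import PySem

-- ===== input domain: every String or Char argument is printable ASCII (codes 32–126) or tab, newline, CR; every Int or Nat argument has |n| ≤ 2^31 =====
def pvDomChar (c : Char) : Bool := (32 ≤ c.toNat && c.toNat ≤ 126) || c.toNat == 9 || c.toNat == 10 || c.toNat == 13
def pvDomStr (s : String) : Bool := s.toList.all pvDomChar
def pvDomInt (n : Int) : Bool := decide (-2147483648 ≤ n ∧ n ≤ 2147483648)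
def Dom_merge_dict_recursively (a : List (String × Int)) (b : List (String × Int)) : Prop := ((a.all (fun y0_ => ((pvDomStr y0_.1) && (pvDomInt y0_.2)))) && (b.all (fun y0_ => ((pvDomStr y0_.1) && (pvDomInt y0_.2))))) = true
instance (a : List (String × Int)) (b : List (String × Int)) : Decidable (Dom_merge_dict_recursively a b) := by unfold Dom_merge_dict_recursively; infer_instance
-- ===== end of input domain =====

-- B rebuilds the merge as a fresh dict (one pass over a choosing a's or b's value per key,
-- then appending b-only keys) instead of A's deepcopy-of-a updated in place by a loop over b;
-- objective: alternative decomposition, same cost.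


-- ===== PORT A =====
-- Values are Int here, so `isinstance(result[k], dict)` is always False and the loop body is
-- always the else branch `result[k] = deepcopy(v)` (deepcopy of an int is the int itself).
-- `result = deepcopy(a)` is the input dict itself (ints are immutable; return value unchanged).
def merge_dict_recursively (a : List (String × Int)) (b : List (String × Int)) : List (String × Int) :=
  (b.foldl (fun result kv => result.insert kv.1 kv.2) (PySem.Dict.mk a)).items

-- ===== PORT B =====
-- Values are Int here, so B's `isinstance(v, dict)` branch never fires; the first loop keeps
-- the two remaining branches (`k not in b` → a's value, else → b's value) in B's order.
def merge_dict_recursively_alt (a : List (String × Int)) (b : List (String × Int)) : List (String × Int) :=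
  let bd : PySem.Dict String Int := PySem.Dict.mk b
  let merged := a.foldl (fun m kv =>
      if !bd.contains kv.1 then m.insert kv.1 kv.2
      else m.insert kv.1 (bd.getD kv.1 kv.2)) PySem.Dict.empty
  (b.foldl (fun m kv =>
      if (PySem.Dict.mk a).contains kv.1 then m else m.insert kv.1 kv.2) merged).items

-- ===== PRECONDITION & SPEC =====
-- Pre_ excludes association lists with duplicate keys: they do not encode any Python dict
-- (a dict's keys are unique), so the ports' behaviour there is an artefact of the encoding.
def Pre_merge_dict_recursively (a : List (String × Int)) (b : List (String × Int)) : Prop :=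
  (a.map Prod.fst).Nodup ∧ (b.map Prod.fst).Nodup
instance (a : List (String × Int)) (b : List (String × Int)) : Decidable (Pre_merge_dict_recursively a b) := by unfold Pre_merge_dict_recursively; infer_instance
def pvWitness_merge_dict_recursively : (List (String × Int)) × (List (String × Int)) :=
  ([("x", 1), ("z", 3)], [("x", 5), ("y", 2)])
def Spec_merge_dict_recursively (a : List (String × Int)) (b : List (String × Int)) (out : List (String × Int)) : Prop := out = merge_dict_recursively_alt a b
instance (a : List (String × Int)) (b : List (String × Int)) (out : List (String × Int)) : Decidable (Spec_merge_dict_recursively a b out) := by unfold Spec_merge_dict_recursively; infer_instance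

-- ===== CLAIM (what is proved, stated in full; the proofs are below) =====
def Claim_equal_merge_dict_recursively : Prop := ∀ (a : List (String × Int)) (b : List (String × Int)), Dom_merge_dict_recursively a b → Pre_merge_dict_recursively a b → Spec_merge_dict_recursively a b (merge_dict_recursively a b)

-- ===== LEMMAS AND PROOFS =====

-- canonical form: a's entries with values updated from b, then b's fresh keys in order
def pvUpd (b : List (String × Int)) (kv : String × Int) : String × Int :=
  (kv.1, ((PySem.Dict.mk b).get? kv.1).getD kv.2)

lemma pvA_items (b : List (String × Int)) (d : PySem.Dict String Int)
    (hd : (PySem.Dict.keys d).Nodup) (hb : (b.map Prod.fst).Nodup) :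
    (b.foldl (fun r kv => r.insert kv.1 kv.2) d).items
      = d.items.map (pvUpd b) ++ b.filter (fun kv => !(d.contains kv.1)) := by
  induction b generalizing d with
  | nil =>
      rw [show pvUpd [] = id from rfl, List.map_id]
      simp
  | cons kv b' ih =>
      obtain ⟨k, v⟩ := kv
      rw [List.map_cons] at hb
      have hnd := List.nodup_cons.mp hb
      have hknotin : k ∉ b'.map Prod.fst := hnd.1
      have hb' : (b'.map Prod.fst).Nodup := hnd.2
      have hget : (PySem.Dict.mk b').get? k = none := by
        rw [PySem.Dict.get?_eq_none_iff_not_mem_keys]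
        simpa [PySem.Dict.keys_mk] using hknotin
      have hfilt : ∀ p ∈ b', (!(d.insert k v).contains p.1) = (!d.contains p.1) := by
        intro p hp
        have : p.1 ≠ k := by
          intro h; exact hknotin (h ▸ List.mem_map_of_mem hp)
        simp [PySem.Dict.contains_insert, this]
      simp only [List.foldl_cons]
      rw [ih (d.insert k v) (PySem.Dict.nodup_keys_insert d k v hd) hb',
          List.filter_congr hfilt]
      cases hc : d.contains k with
      | false =>
          rw [PySem.Dict.items_insert_of_not_contains d v hc]
          have hmap : ∀ p ∈ d.items, pvUpd b' p = pvUpd ((k, v) :: b') p := by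
            intro p hp
            have hpk : p.1 ≠ k := by
              intro h
              have : k ∈ PySem.Dict.keys d := by
                simpa [PySem.Dict.keys, h] using List.mem_map_of_mem (f := Prod.fst) hp
              rw [← PySem.Dict.contains_iff_mem_keys] at this
              simp [hc] at this
            simp [pvUpd, PySem.Dict.get?_mk_cons, (by simpa using hpk.symm : ¬ (k = p.1))]
          have hkv : pvUpd b' (k, v) = (k, v) := by simp [pvUpd, hget]
          rw [List.map_append, List.map_congr_left hmap]
          simp [hkv, hc]
      | true =>
          rw [PySem.Dict.items_insert_of_contains d v hc, List.map_map]
          have hmap : ∀ p ∈ d.items,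
              (pvUpd b' ∘ fun p => if (p.1 == k) = true then (k, v) else p) p
                = pvUpd ((k, v) :: b') p := by
            intro p hp
            by_cases hpk : p.1 = k
            · simp [pvUpd, hpk, hget, PySem.Dict.get?_mk_cons]
            · simp [pvUpd, hpk, PySem.Dict.get?_mk_cons, (by simpa using (Ne.symm hpk) : ¬ (k = p.1))]
          rw [List.map_congr_left hmap]
          simp [hc]

lemma pvB_first (a b : List (String × Int)) (ha : (a.map Prod.fst).Nodup) :
    (a.foldl (fun m kv =>
        if !(PySem.Dict.mk b).contains kv.1 then m.insert kv.1 kv.2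
        else m.insert kv.1 ((PySem.Dict.mk b).getD kv.1 kv.2)) PySem.Dict.empty).items
      = a.map (pvUpd b) := by
  have hfun : (fun (m : PySem.Dict String Int) (kv : String × Int) =>
        if !(PySem.Dict.mk b).contains kv.1 then m.insert kv.1 kv.2
        else m.insert kv.1 ((PySem.Dict.mk b).getD kv.1 kv.2))
      = fun m kv => m.insert kv.1 ((PySem.Dict.mk b).getD kv.1 kv.2) := by
    funext m kv
    cases hc : (PySem.Dict.mk b).contains kv.1 with
    | false => simp [PySem.Dict.getD_of_not_contains _ _ hc]
    | true => simp
  rw [hfun]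
  rw [PySem.Dict.items_foldl_insert_fresh a Prod.fst
        (fun kv => (PySem.Dict.mk b).getD kv.1 kv.2) PySem.Dict.empty
        (fun _ _ => PySem.Dict.contains_empty _) ha]
  simp [pvUpd, PySem.Dict.getD_eq_get?_getD, PySem.Dict.empty]

lemma pvSkipFilter {α β : Type} (f : β → α → β) (c : α → Bool) (l : List α) (init : β) :
    l.foldl (fun m x => if c x then m else f m x) init
      = (l.filter (fun x => !c x)).foldl f init := by
  induction l generalizing init with
  | nil => rfl
  | cons x l ih =>
      cases hc : c x <;> simp [hc, ih]

lemma pvB_second (a b : List (String × Int)) (m : PySem.Dict String Int)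
    (hb : (b.map Prod.fst).Nodup)
    (hm : ∀ kv ∈ b, (PySem.Dict.mk a).contains kv.1 = false → m.contains kv.1 = false) :
    (b.foldl (fun m kv =>
        if (PySem.Dict.mk a).contains kv.1 then m else m.insert kv.1 kv.2) m).items
      = m.items ++ b.filter (fun kv => !((PySem.Dict.mk a).contains kv.1)) := by
  rw [pvSkipFilter]
  rw [PySem.Dict.items_foldl_insert_fresh _ Prod.fst Prod.snd m
        (fun kv hkv => hm kv (List.mem_of_mem_filter hkv)
          (by simpa using (List.of_mem_filter hkv)))
        (hb.sublist ((List.filter_sublist (l := b)).map Prod.fst))]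
  simp

-- ===== VERDICT (by name: the statement is the Claim_ definition above) =====
theorem merge_dict_recursively_spec : Claim_equal_merge_dict_recursively := by
  intro a b _ hpre
  obtain ⟨ha, hb⟩ := hpre
  show merge_dict_recursively a b = merge_dict_recursively_alt a b
  have hA : merge_dict_recursively a b
      = a.map (pvUpd b) ++ b.filter (fun kv => !((PySem.Dict.mk a).contains kv.1)) := by
    unfold merge_dict_recursively
    exact pvA_items b (PySem.Dict.mk a) (by simpa [PySem.Dict.keys_mk] using ha) hb
  have hMitems := pvB_first a b ha
  have hm : ∀ kv ∈ b, (PySem.Dict.mk a).contains kv.1 = false →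
      (a.foldl (fun m kv => if !(PySem.Dict.mk b).contains kv.1 then m.insert kv.1 kv.2
          else m.insert kv.1 ((PySem.Dict.mk b).getD kv.1 kv.2)) PySem.Dict.empty).contains kv.1
        = false := by
    intro kv _ hcf
    cases hMC : (a.foldl (fun m kv => if !(PySem.Dict.mk b).contains kv.1 then m.insert kv.1 kv.2
        else m.insert kv.1 ((PySem.Dict.mk b).getD kv.1 kv.2)) PySem.Dict.empty).contains kv.1 with
    | false => rfl
    | true =>
        exfalso
        have hmem := (PySem.Dict.contains_iff_mem_keys _ kv.1).mp hMC
        simp only [PySem.Dict.keys, hMitems, List.map_map] at hmem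
        have : kv.1 ∈ a.map Prod.fst := by
          simpa [pvUpd, Function.comp] using hmem
        have : (PySem.Dict.mk a).contains kv.1 = true := by
          rw [PySem.Dict.contains_iff_mem_keys]
          simpa [PySem.Dict.keys_mk] using this
        simp [hcf] at this
  have hB : merge_dict_recursively_alt a b
      = a.map (pvUpd b) ++ b.filter (fun kv => !((PySem.Dict.mk a).contains kv.1)) := by
    show (b.foldl (fun m kv => if (PySem.Dict.mk a).contains kv.1 then m else m.insert kv.1 kv.2)
        (a.foldl (fun m kv => if !(PySem.Dict.mk b).contains kv.1 then m.insert kv.1 kv.2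
            else m.insert kv.1 ((PySem.Dict.mk b).getD kv.1 kv.2)) PySem.Dict.empty)).items = _
    rw [pvB_second a b _ hb hm, hMitems]
  rw [hA, hB]
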